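-- pv_equiv track=rewrite | github.com/rsvarma/generation-model-analyzer | src/utils/modelutils.py | remove_contraction_spaces
-- ===== SOURCE A (Python) =====
-- def remove_contraction_spaces(string):
--     new_str = ''
--     for i in range(len(string)):
--         if string[i] == "'" and i+1 < len(string) and string[i+1].isalpha():
--             new_str = new_str[:-1]+string[i]
--         else:
--             new_str += string[i]
--     return new_str
-- ===== SOURCE B (Python) =====
-- def remove_contraction_spaces(string):
--     # Single forward pass with lookahead: a character is dropped exactly when
--     # the next character is an apostrophe that starts a contraction.
--     n = len(string)
--
--     def keep(i):
--         return not (i + 1 < n and string[i + 1] == "'"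
--                     and i + 2 < n and string[i + 2].isalpha())
--
--     return ''.join(c for i, c in enumerate(string) if keep(i))
-- ===== Notes on version B (the rewrite author's own statement) =====
-- stated objective: simpler
-- what changed: Instead of building the output by appending and then truncating it again on each contraction apostrophe, B decides per character with a forward lookahead whether it survives and joins the kept characters in one filtering pass.
import Mathlib
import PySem

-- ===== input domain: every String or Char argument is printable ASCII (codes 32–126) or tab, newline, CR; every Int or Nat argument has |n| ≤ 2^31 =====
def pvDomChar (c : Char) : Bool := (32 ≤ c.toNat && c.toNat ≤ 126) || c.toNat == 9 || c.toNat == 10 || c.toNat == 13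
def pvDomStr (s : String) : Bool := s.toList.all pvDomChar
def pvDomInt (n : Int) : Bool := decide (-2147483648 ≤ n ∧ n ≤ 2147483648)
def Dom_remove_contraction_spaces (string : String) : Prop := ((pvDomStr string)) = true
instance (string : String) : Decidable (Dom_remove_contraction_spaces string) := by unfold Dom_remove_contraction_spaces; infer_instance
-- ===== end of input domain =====

-- B replaces A's append-then-truncate accumulator by a one-pass lookahead filter
-- (keep string[i] unless string[i+1] is an apostrophe starting a contraction); simpler decomposition.

-- ===== PORT A =====
-- loop body of A: if string[i] == "'" and i+1 < len(string) and string[i+1].isalpha():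
--                     new_str = new_str[:-1] + string[i]
--                 else: new_str += string[i]
def pvAstep (l : List Char) (new_str : List Char) (i : Nat) : List Char :=
  if PySem.List.pyGetD l (i : Int) ' ' = '\'' ∧ (i : Int) + 1 < (l.length : Int) ∧
     PySem.Chars.isalpha (PySem.List.pyGetD l ((i : Int) + 1) ' ') = true then
    PySem.List.slice new_str none (some (-1)) ++ [PySem.List.pyGetD l (i : Int) ' ']
  else
    new_str ++ [PySem.List.pyGetD l (i : Int) ' ']

def remove_contraction_spaces (string : String) : String :=
  String.ofList ((List.range string.toList.length).foldl (pvAstep string.toList) [])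

-- ===== PORT B =====
-- keep(i) of B: not (i+1 < n and string[i+1] == "'" and i+2 < n and string[i+2].isalpha())
def pvBkeep (l : List Char) (p : Int × Char) : Bool :=
  !(decide (p.1 + 1 < (l.length : Int)) && (PySem.List.pyGetD l (p.1 + 1) ' ' == '\'') &&
    decide (p.1 + 2 < (l.length : Int)) && PySem.Chars.isalpha (PySem.List.pyGetD l (p.1 + 2) ' '))

def remove_contraction_spaces_alt (string : String) : String :=
  String.ofList (((PySem.List.enumerate string.toList).filter (pvBkeep string.toList)).map (·.2))

-- ===== PRECONDITION & SPEC =====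
def Spec_remove_contraction_spaces (string : String) (out : String) : Prop := out = remove_contraction_spaces_alt string
instance (string : String) (out : String) : Decidable (Spec_remove_contraction_spaces string out) := by unfold Spec_remove_contraction_spaces; infer_instance

-- ===== CLAIM (what is proved, stated in full; the proofs are below) =====
def Claim_equal_remove_contraction_spaces : Prop := ∀ (string : String), Dom_remove_contraction_spaces string → Spec_remove_contraction_spaces string (remove_contraction_spaces string)

-- ===== LEMMAS AND PROOFS =====

-- A's branch condition at index i, on the Nat side
def pvCond (l : List Char) (i : Nat) : Bool :=
  decide (l.getD i ' ' = '\'') && decide (i + 1 < l.length) &&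
    PySem.Chars.isalpha (l.getD (i + 1) ' ')

-- B's keep test, on the Nat side
def pvKeep (l : List Char) (j : Nat) : Bool :=
  !(decide (j + 1 < l.length) && (l.getD (j + 1) ' ' == '\'') &&
    decide (j + 2 < l.length) && PySem.Chars.isalpha (l.getD (j + 2) ' '))

lemma pvAstep_eq (l acc : List Char) (i : Nat) :
    pvAstep l acc i =
      if pvCond l i then acc.dropLast ++ [l.getD i ' '] else acc ++ [l.getD i ' '] := by
  unfold pvAstep pvCond
  have c0 : PySem.List.pyGetD l ((i : Nat) : Int) ' ' = l.getD i ' ' := by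
    rw [PySem.List.pyGetD_natCast]
  have c1 : PySem.List.pyGetD l ((i : Int) + 1) ' ' = l.getD (i + 1) ' ' := by
    rw [(by push_cast; ring : (i : Int) + 1 = ((i + 1 : Nat) : Int)), PySem.List.pyGetD_natCast]
  have hiff : ((i : Int) + 1 < (l.length : Int)) ↔ (i + 1 < l.length) := by omega
  rw [c0, c1, PySem.List.slice_to_neg_one]
  exact if_congr (by simp [hiff, and_assoc]) rfl rfl

lemma pvBkeep_cast (l : List Char) (j : Nat) (c : Char) :
    pvBkeep l ((j : Int), c) = pvKeep l j := by
  unfold pvBkeep pvKeep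
  have c1 : ((j : Int) + 1) = ((j + 1 : Nat) : Int) := by push_cast; ring
  have c2 : ((j : Int) + 2) = ((j + 2 : Nat) : Int) := by push_cast; ring
  rw [c1, c2, PySem.List.pyGetD_natCast, PySem.List.pyGetD_natCast,
    decide_eq_decide.mpr (by omega : ((j + 1 : Nat) : Int) < (l.length : Int) ↔ j + 1 < l.length),
    decide_eq_decide.mpr (by omega : ((j + 2 : Nat) : Int) < (l.length : Int) ↔ j + 2 < l.length)]

lemma pvKeep_iff (l : List Char) (k : Nat) (h : k + 1 < l.length) :
    pvKeep l k = !(pvCond l (k + 1)) := by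
  unfold pvKeep pvCond
  by_cases h1 : l.getD (k + 1) ' ' = '\'' <;>
    by_cases h2 : k + 1 + 1 < l.length <;>
      by_cases h3 : PySem.Chars.isalpha (l.getD (k + 1 + 1) ' ') = true <;>
        simp_all [show k + 2 = k + 1 + 1 from rfl]

lemma pvKeep_last (l : List Char) (m : Nat) (h : l.length = m + 1) :
    pvKeep l m = true := by
  unfold pvKeep
  simp [h]

-- loop invariant for A: after processing indices 0..k (k < length), the accumulator is
-- the kept characters among indices < k followed by character k.
lemma A_inv (l : List Char) (k : Nat) (hk : k < l.length) :
    (List.range (k + 1)).foldl (pvAstep l) []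
      = ((List.range k).filter (pvKeep l)).map (fun j => l.getD j ' ') ++ [l.getD k ' '] := by
  induction k with
  | zero =>
      have h1 : List.range (0 + 1) = [0] := by decide
      rw [h1, List.foldl_cons, List.foldl_nil, pvAstep_eq]
      split <;> simp
  | succ k ih =>
      have hk' : k < l.length := Nat.lt_of_succ_lt hk
      rw [List.range_succ, List.foldl_append, ih hk', List.foldl_cons, List.foldl_nil,
        pvAstep_eq, List.range_succ, List.filter_append, List.map_append]
      by_cases hC : pvCond l (k + 1) = true
      · rw [if_pos hC, List.dropLast_concat]
        have : pvKeep l k = false := by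
          rw [pvKeep_iff l k hk]; simp [hC]
        simp [this]
      · rw [if_neg hC]
        rw [Bool.not_eq_true] at hC
        have : pvKeep l k = true := by
          rw [pvKeep_iff l k hk]; simp [hC]
        simp [this]

-- B's list equals the Nat-indexed filter
lemma B_eq_filter (l : List Char) :
    ((PySem.List.enumerate l).filter (pvBkeep l)).map (·.2)
      = ((List.range l.length).filter (pvKeep l)).map (fun j => l.getD j ' ') := by
  rw [PySem.List.enumerate_eq_map_pyRange (d := ' '), PySem.List.pyRange_one]
  simp [List.map_map, List.filter_map, List.getD]
  rw [show (pvBkeep l ∘ (fun j => (j, PySem.List.pyGetD l j ' ')) ∘ fun k : Nat => (k : Int))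
        = pvKeep l from funext fun j => pvBkeep_cast l j _,
      show ((fun x : Int × Char => x.2) ∘ (fun j => (j, PySem.List.pyGetD l j ' ')) ∘ fun k : Nat => (k : Int))
        = fun j : Nat => l[j]?.getD ' ' from funext fun j => by
          show PySem.List.pyGetD l (j : Int) ' ' = l[j]?.getD ' '
          rw [PySem.List.pyGetD_natCast]
          simp [List.getD]]

lemma main_eq (l : List Char) :
    (List.range l.length).foldl (pvAstep l) []
      = ((PySem.List.enumerate l).filter (pvBkeep l)).map (·.2) := by
  rw [B_eq_filter]
  cases hl : l.length with
  | zero => simp [hl]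
  | succ m =>
      rw [A_inv l m (by omega), List.range_succ, List.filter_append, List.map_append]
      simp [pvKeep_last l m hl]

-- ===== VERDICT (by name: the statement is the Claim_ definition above) =====
theorem remove_contraction_spaces_spec : Claim_equal_remove_contraction_spaces := by
  intro s _
  unfold Spec_remove_contraction_spaces remove_contraction_spaces remove_contraction_spaces_alt
  exact congrArg String.ofList (main_eq s.toList)
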